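-- pv_equiv track=rewrite | github.com/helibene/l-system-curve | sequence.py | fiboWorld2
-- ===== SOURCE A (Python) =====
-- def fiboWorld2(n):
--     series = ["0","01"]
--     for i in range(2,n+1):
--         if i%3==2 :
--             series.append(series[i-1]+invertBinaryString(series[i-2]))
--         else :
--             series.append(series[i-1]+series[i-2])
--     return series[n]
--
-- def invertBinaryString(string):
--     return_str = ""
--     for i in range(len(string)) :
--         if string[i]=="1":
--             return_str = return_str + "0"
--         elif string[i]=="0":
--             return_str = return_str + "1"
--     return return_str
-- ===== SOURCE B (Python) =====
-- _INV = str.maketrans("01", "10")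
--
--
-- def _f(i, memo):
--     if i < 2:
--         return ["0", "01"][i]
--     if i not in memo:
--         s = _f(i - 1, memo) + (_f(i - 2, memo).translate(_INV) if i % 3 == 2 else _f(i - 2, memo))
--         memo[i] = s
--         memo.pop(i - 2, None)  # term i-2 can never be requested again
--     return memo[i]
--
--
-- def fiboWorld2(n):
--     return _f(n, {})
-- ===== Notes on version B (the rewrite author's own statement) =====
-- stated objective: alternative
-- what changed: Top-down recursion f(i)=f(i-1)+maybe-inverted f(i-2) with a memo dict (evicting entries that can no longer be requested) replaces A's bottom-up table build with indexed lookups, and str.translate replaces A's char-by-char inversion loop.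
-- outside the precondition, e.g. on fiboWorld2(-3): A raises IndexError, B raises IndexError
import Mathlib
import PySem

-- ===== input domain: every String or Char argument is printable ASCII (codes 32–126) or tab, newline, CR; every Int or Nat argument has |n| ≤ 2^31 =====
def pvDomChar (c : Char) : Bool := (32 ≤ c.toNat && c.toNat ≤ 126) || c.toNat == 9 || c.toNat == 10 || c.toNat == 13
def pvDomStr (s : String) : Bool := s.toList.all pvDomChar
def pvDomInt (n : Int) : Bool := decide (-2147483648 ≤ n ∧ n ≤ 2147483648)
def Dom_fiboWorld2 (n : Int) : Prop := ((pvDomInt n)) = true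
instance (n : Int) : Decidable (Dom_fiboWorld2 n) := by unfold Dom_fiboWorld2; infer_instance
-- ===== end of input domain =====

-- B replaces A's bottom-up table (a growing list read back via series[i-1]/series[i-2]) by
-- top-down memoized recursion on the index (the memo evicts dead entries), and A's char-by-char
-- inversion loop by a single str.translate pass
-- ("alternative"; the memo dict only caches f's values, so the memo-free recursion below is
-- a faithful port of B's recursive structure).

-- ===== PORT A =====
-- invertBinaryString: builds the inverted string char by char, skipping non-binary chars
def pvInvert (s : String) : String :=
  String.ofList (s.toList.foldl (fun acc c =>
    if c == '1' then acc ++ ['0']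
    else if c == '0' then acc ++ ['1']
    else acc) [])

def fiboWorld2 (n : Int) : String :=
  let series := (PySem.List.pyRange 2 (n + 1) 1).foldl (fun series i =>
    if PySem.Int.mod i 3 == 2 then
      series ++ [((PySem.List.pyGet? series (i - 1)).getD "") ++
                 pvInvert ((PySem.List.pyGet? series (i - 2)).getD "")]
    else
      series ++ [((PySem.List.pyGet? series (i - 1)).getD "") ++
                 ((PySem.List.pyGet? series (i - 2)).getD "")]) ["0", "01"]
  (PySem.List.pyGet? series n).getD ""   -- `getD ""` is unreachable under Pre_ (IndexError excluded)

-- ===== PORT B =====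
-- s.translate(str.maketrans("01","10")): per-character substitution, other chars unchanged
def pvAltInvert (s : String) : String :=
  String.ofList (s.toList.map (fun c => if c == '0' then '1' else if c == '1' then '0' else c))

-- the recursive helper f for i >= 2 (the memo dict caches exactly these values)
def pvFRec : Nat → String
  | 0 => "0"
  | 1 => "01"
  | (k + 2) => pvFRec (k + 1) ++ (if (k + 2) % 3 == 2 then pvAltInvert (pvFRec k) else pvFRec k)

def fiboWorld2_alt (n : Int) : String :=
  if n < 2 then
    (PySem.List.pyGet? ["0", "01"] n).getD ""   -- f's base case; `getD ""` unreachable under Pre_ (IndexError for n ≤ -3)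
  else
    pvFRec n.toNat

-- ===== PRECONDITION & SPEC =====
-- Both Pythons raise IndexError for n ≤ -3 (series[n] / ["0","01"][i] out of range); Pre_ excludes exactly those.
def Pre_fiboWorld2 (n : Int) : Prop := -2 ≤ n
instance (n : Int) : Decidable (Pre_fiboWorld2 n) := by unfold Pre_fiboWorld2; infer_instance
def pvWitness_fiboWorld2 : Int := 7

def Spec_fiboWorld2 (n : Int) (out : String) : Prop := out = fiboWorld2_alt n
instance (n : Int) (out : String) : Decidable (Spec_fiboWorld2 n out) := by unfold Spec_fiboWorld2; infer_instance

-- ===== CLAIM (what is proved, stated in full; the proofs are below) =====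
def Claim_equal_fiboWorld2 : Prop := ∀ (n : Int), Dom_fiboWorld2 n → Pre_fiboWorld2 n → Spec_fiboWorld2 n (fiboWorld2 n)

-- ===== LEMMAS AND PROOFS =====

-- A's inversion fold, rewritten as a filterMap
theorem pvInvert_chars (l acc : List Char) :
    l.foldl (fun acc c =>
      if c == '1' then acc ++ ['0']
      else if c == '0' then acc ++ ['1']
      else acc) acc
    = acc ++ l.filterMap (fun c =>
        if c == '0' then some '1' else if c == '1' then some '0' else none) := by
  induction l generalizing acc with
  | nil => simp
  | cons c cs ih =>
    by_cases h1 : c = '1' <;> by_cases h0 : c = '0' <;>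
      simp_all [List.foldl_cons]

-- every string pvFRec produces is over the alphabet {'0','1'}
theorem pvFRec_binary (k : Nat) :
    (pvFRec k).toList.all (fun c => c == '0' || c == '1') = true := by
  induction k using pvFRec.induct with
  | case1 => decide
  | case2 => decide
  | case3 k ih1 ih2 =>
    rw [pvFRec]
    simp only [List.all_eq_true] at ih1 ih2 ⊢
    by_cases h : ((k + 2) % 3 == 2) = true
    · rw [if_pos h]
      simp only [pvAltInvert, String.toList_append, List.mem_append,
        String.toList_ofList, List.mem_map]
      intro c hc
      rcases hc with hc | ⟨d, hd, rfl⟩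
      · exact ih1 c hc
      · rcases Bool.or_eq_true_iff.mp (ih2 d hd) with hb | hb <;> simp_all
    · rw [if_neg h]
      simp only [String.toList_append, List.mem_append]
      intro c hc
      rcases hc with hc | hc
      · exact ih1 c hc
      · exact ih2 c hc

-- on binary strings A's skip-or-flip inversion equals B's translate
theorem pvFilterMap_eq_map_bin (l : List Char)
    (hb : l.all (fun c => c == '0' || c == '1') = true) :
    l.filterMap (fun c => if c == '0' then some '1' else if c == '1' then some '0' else none)
      = l.map (fun c => if c == '0' then '1' else if c == '1' then '0' else c) := by
  induction l with
  | nil => rfl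
  | cons c cs ih =>
    simp only [List.all_cons, Bool.and_eq_true] at hb
    rcases hb with ⟨hc, hcs⟩
    have := ih hcs
    rcases Bool.or_eq_true_iff.mp hc with h | h <;>
      simp_all

theorem pvInvert_eq_bin (s : String)
    (hb : s.toList.all (fun c => c == '0' || c == '1') = true) :
    pvInvert s = pvAltInvert s := by
  unfold pvInvert pvAltInvert
  rw [pvInvert_chars, List.nil_append, pvFilterMap_eq_map_bin _ hb]

-- the i % 3 == 2 test over a cast index
theorem pvMod_cast (k : Nat) : (PySem.Int.mod ((k : Nat) : Int) 3 == 2) = (k % 3 == 2) := by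
  rw [show (3 : Int) = ((3 : Nat) : Int) from rfl, PySem.Int.mod_natCast]
  by_cases h : k % 3 = 2 <;> simp [h] <;> omega

-- A's loop body, named for the invariant
def pvStep (series : List String) (i : Int) : List String :=
  if PySem.Int.mod i 3 == 2 then
    series ++ [((PySem.List.pyGet? series (i - 1)).getD "") ++
               pvInvert ((PySem.List.pyGet? series (i - 2)).getD "")]
  else
    series ++ [((PySem.List.pyGet? series (i - 1)).getD "") ++
               ((PySem.List.pyGet? series (i - 2)).getD "")]

-- invariant for A: after the loop up to m (m ≥ 1) the table is [pvFRec 0, …, pvFRec m]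
theorem pvSeries_eq (m : Nat) (hm : 1 ≤ m) :
    (PySem.List.pyRange 2 ((m : Int) + 1) 1).foldl pvStep ["0", "01"]
      = (List.range (m + 1)).map pvFRec := by
  induction m with
  | zero => omega
  | succ k ih =>
    by_cases hk : 1 ≤ k
    · have hsplit : PySem.List.pyRange 2 (((k + 1 : Nat) : Int) + 1) 1
          = PySem.List.pyRange 2 ((k : Int) + 1) 1 ++ [((k : Int) + 1)] := by
        have : (((k + 1 : Nat) : Int) + 1) = ((k : Int) + 1) + 1 := by push_cast; ring
        rw [this, PySem.List.pyRange_one_succ_right (by omega)]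
      rw [hsplit, List.foldl_append, ih hk]
      simp only [List.foldl_cons, List.foldl_nil]
      have hg1 : (PySem.List.pyGet? ((List.range (k + 1)).map pvFRec) (((k : Int) + 1) - 1)).getD ""
          = pvFRec k := by
        have : ((k : Int) + 1) - 1 = ((k : Nat) : Int) := by ring
        rw [this, PySem.List.pyGet?_natCast]
        simp
      have hg2 : (PySem.List.pyGet? ((List.range (k + 1)).map pvFRec) (((k : Int) + 1) - 2)).getD ""
          = pvFRec (k - 1) := by
        have : ((k : Int) + 1) - 2 = ((k - 1 : Nat) : Int) := by omega
        rw [this, PySem.List.pyGet?_natCast]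
        have : k - 1 < k + 1 := by omega
        simp [this]
      have hmod : (PySem.Int.mod ((k : Int) + 1) 3 == 2) = ((k + 1) % 3 == 2) := by
        have : ((k : Int) + 1) = ((k + 1 : Nat) : Int) := by push_cast; ring
        rw [this, pvMod_cast]
      have hF : pvFRec (k + 1)
          = pvFRec k ++ (if (k + 1) % 3 == 2 then pvAltInvert (pvFRec (k - 1)) else pvFRec (k - 1)) := by
        obtain ⟨j, rfl⟩ : ∃ j, k = j + 1 := ⟨k - 1, by omega⟩
        simp [pvFRec]
      rw [List.range_succ (n := k + 1), List.map_append]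
      simp only [pvStep, hg1, hg2, hmod, pvInvert_eq_bin _ (pvFRec_binary (k - 1)),
        List.map_cons, List.map_nil]
      rw [hF]
      by_cases h : (k + 1) % 3 = 2 <;> simp [h]
    · have hk0 : k = 0 := by omega
      subst hk0
      decide

theorem fiboWorld2_nonneg (m : Nat) : fiboWorld2 (m : Int) = pvFRec m := by
  by_cases hm : 1 ≤ m
  · show (PySem.List.pyGet? ((PySem.List.pyRange 2 ((m : Int) + 1) 1).foldl _ ["0", "01"]) (m : Int)).getD "" = _
    have : (fun (series : List String) (i : Int) => if PySem.Int.mod i 3 == 2 then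
        series ++ [((PySem.List.pyGet? series (i - 1)).getD "") ++
                   pvInvert ((PySem.List.pyGet? series (i - 2)).getD "")]
      else
        series ++ [((PySem.List.pyGet? series (i - 1)).getD "") ++
                   ((PySem.List.pyGet? series (i - 2)).getD "")]) = pvStep := by
      funext s i; simp [pvStep]
    rw [this, pvSeries_eq m hm, PySem.List.pyGet?_natCast]
    simp
  · have : m = 0 := by omega
    subst this
    decide

-- ===== VERDICT (by name: the statement is the Claim_ definition above) =====
theorem fiboWorld2_spec : Claim_equal_fiboWorld2 := by
  intro n _ hpre
  unfold Spec_fiboWorld2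
  unfold Pre_fiboWorld2 at hpre
  rcases lt_or_ge n 0 with hneg | hpos
  · interval_cases n
    · decide
    · decide
  · obtain ⟨m, rfl⟩ : ∃ m : Nat, n = (m : Int) := ⟨n.toNat, by omega⟩
    rw [fiboWorld2_nonneg]
    unfold fiboWorld2_alt
    by_cases hm : (m : Int) < 2
    · rw [if_pos hm]
      have hm2 : m < 2 := by omega
      interval_cases m <;> decide
    · rw [if_neg hm]
      simp
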